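-- pv_equiv track=rewrite | github.com/parikhas/Rosalind | dna.py | sseq
-- ===== SOURCE A (Python) =====
-- def sseq(s,t):
--     substring_ind = []
--     substring_l = [i for i in t]
--     for i in range(len(s)):
--         if len(substring_l) > 0:
--             if s[i] == substring_l[0]:
--                 substring_ind.append(i+1)
--                 del substring_l[0]
--         else:
--             break
--     return substring_ind
-- ===== SOURCE B (Python) =====
-- def sseq(s, t):
--     # One pointer walks s; for each character of t we scan forward to its
--     # next occurrence.  No list copy of t, no O(k) front deletions.
--     res = []
--     pos = 0
--     n = len(s)
--     for ch in t:
--         i = pos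
--         while i < n and s[i] != ch:
--             i += 1
--         if i == n:
--             break
--         res.append(i + 1)
--         pos = i + 1
--     return res
-- ===== Notes on version B (the rewrite author's own statement) =====
-- stated objective: faster
-- what changed: Instead of scanning s while repeatedly deleting the matched character from the front of a list copy of t, B loops over t and advances a single position pointer through s to the next occurrence of each character.
import Mathlib
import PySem

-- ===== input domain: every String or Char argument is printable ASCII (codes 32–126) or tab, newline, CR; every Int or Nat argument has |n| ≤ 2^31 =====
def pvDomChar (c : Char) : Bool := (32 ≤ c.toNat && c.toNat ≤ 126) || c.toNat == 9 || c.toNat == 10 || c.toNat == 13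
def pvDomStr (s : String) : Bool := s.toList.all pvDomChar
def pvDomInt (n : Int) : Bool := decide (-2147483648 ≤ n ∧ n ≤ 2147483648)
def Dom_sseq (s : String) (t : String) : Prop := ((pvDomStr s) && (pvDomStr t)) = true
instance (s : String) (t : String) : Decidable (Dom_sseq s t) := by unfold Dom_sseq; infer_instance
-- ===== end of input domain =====

-- B replaces A's list copy of t with front deletions by a single position pointer into s (objective: faster).

-- ===== PORT A =====
-- A's loop over range(len(s)): state is the remaining characters of t (substring_l);
-- 'break' when it is empty, append i+1 on a head match, drop the head.
def sseqA_loop : List Char → Nat → List Char → List Int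
  | [], _, _ => []
  | c :: rest, i, l =>
    match l with
    | [] => []
    | x :: xs =>
      if c = x then ((i : Int) + 1) :: sseqA_loop rest (i + 1) xs
      else sseqA_loop rest (i + 1) (x :: xs)

def sseq (s : String) (t : String) : List Int := sseqA_loop s.toList 0 t.toList

-- ===== PORT B =====
-- hand port of B's inner 'while i < n and s[i] != ch: i += 1' over the suffix s[pos:];
-- 'none' corresponds to the loop ending with i == n (character not found). Exact.
def sseqB_scan : List Char → Char → Nat → Option Nat
  | [], _, _ => none
  | c :: rest, ch, i => if c = ch then some i else sseqB_scan rest ch (i + 1)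

-- B's outer 'for ch in t' loop, carrying the position pointer pos.
def sseqB_go (sl : List Char) : List Char → Nat → List Int
  | [], _ => []
  | ch :: ts, pos =>
    match sseqB_scan (sl.drop pos) ch pos with
    | none => []
    | some i => ((i : Int) + 1) :: sseqB_go sl ts (i + 1)

def sseq_alt (s : String) (t : String) : List Int := sseqB_go s.toList t.toList 0

-- ===== PRECONDITION & SPEC =====
def Spec_sseq (s : String) (t : String) (out : List Int) : Prop := out = sseq_alt s t
instance (s : String) (t : String) (out : List Int) : Decidable (Spec_sseq s t out) := by unfold Spec_sseq; infer_instance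

-- ===== CLAIM (what is proved, stated in full; the proofs are below) =====
def Claim_equal_sseq : Prop := ∀ (s : String) (t : String), Dom_sseq s t → Spec_sseq s t (sseq s t)

-- ===== LEMMAS AND PROOFS =====

-- Invariant: A's loop over the suffix cs = sl.drop pos with remaining pattern l
-- computes the same list as B's pointer loop started at pos with pattern l.
lemma sseq_loop_eq (sl : List Char) :
    ∀ (cs : List Char) (pos : Nat) (l : List Char), sl.drop pos = cs →
      sseqA_loop cs pos l = sseqB_go sl l pos := by
  intro cs
  induction cs with
  | nil =>
    intro pos l h
    cases l with
    | nil => simp [sseqA_loop, sseqB_go]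
    | cons x xs => simp [sseqA_loop, sseqB_go, h, sseqB_scan]
  | cons c rest ih =>
    intro pos l h
    have hrest : sl.drop (pos + 1) = rest := by
      have h2 : (sl.drop pos).tail = sl.drop (pos + 1) := List.tail_drop
      rw [h] at h2
      exact h2.symm
    cases l with
    | nil => simp [sseqA_loop, sseqB_go]
    | cons x xs =>
      by_cases hcx : c = x
      · simp only [sseqA_loop, sseqB_go, h, sseqB_scan, hcx]
        exact congrArg _ (ih (pos + 1) xs hrest)
      · simp only [sseqA_loop, sseqB_go, h, sseqB_scan, if_neg hcx]
        have := ih (pos + 1) (x :: xs) hrest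
        rw [this]
        simp [sseqB_go, hrest]

-- ===== VERDICT (by name: the statement is the Claim_ definition above) =====
theorem sseq_spec : Claim_equal_sseq := by
  intro s t _
  unfold Spec_sseq sseq sseq_alt
  exact sseq_loop_eq s.toList s.toList 0 t.toList (by simp)
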